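-- pv_equiv track=rewrite | github.com/anikashawarma/LicensePlateRec | code files/easyocryolo_final_metrics.py | correct_plate_format
-- ===== SOURCE A (Python) =====
-- def correct_plate_format(text):
--     num2alpha = {'0':'O','1':'I','2':'Z','3':'E','4':'A','5':'S','6':'G','7':'T','8':'B','9':'P'}
--     alpha2num = {'O':'0','I':'1','Z':'2','E':'3','A':'4','S':'5','G':'6','T':'7','B':'8','P':'9'}
--
--     text = text.upper().replace(" ", "")
--     if len(text) != 7:
--         return ""
--
--     out = []
--     for i, ch in enumerate(text):
--         if i < 2 or i >= 4:
--             out.append(num2alpha.get(ch, ch))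
--         else:
--             out.append(alpha2num.get(ch, ch))
--     return "".join(out)
-- ===== SOURCE B (Python) =====
-- def correct_plate_format(text):
--     num2alpha = {'0':'O','1':'I','2':'Z','3':'E','4':'A','5':'S','6':'G','7':'T','8':'B','9':'P'}
--     alpha2num = {'O':'0','I':'1','Z':'2','E':'3','A':'4','S':'5','G':'6','T':'7','B':'8','P':'9'}
--     T_num = str.maketrans(num2alpha)
--     T_alpha = str.maketrans(alpha2num)
--
--     text = text.upper().replace(" ", "")
--     if len(text) != 7:
--         return ""
--     return text[:2].translate(T_num) + text[2:4].translate(T_alpha) + text[4:].translate(T_num)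
-- ===== Notes on version B (the rewrite author's own statement) =====
-- stated objective: idiomatic
-- what changed: Replaces A's indexed per-character loop with positional if/else by two translation tables built once (str.maketrans) applied to three slices text[:2]/text[2:4]/text[4:].
import Mathlib
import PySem

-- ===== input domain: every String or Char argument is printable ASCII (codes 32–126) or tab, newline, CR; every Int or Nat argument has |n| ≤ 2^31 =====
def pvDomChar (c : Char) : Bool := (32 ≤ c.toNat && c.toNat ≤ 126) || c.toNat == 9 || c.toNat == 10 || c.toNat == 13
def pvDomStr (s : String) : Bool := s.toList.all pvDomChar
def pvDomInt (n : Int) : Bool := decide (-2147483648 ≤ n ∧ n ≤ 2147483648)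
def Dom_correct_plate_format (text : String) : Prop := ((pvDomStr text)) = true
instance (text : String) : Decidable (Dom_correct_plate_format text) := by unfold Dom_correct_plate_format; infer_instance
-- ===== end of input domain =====

-- B replaces A's per-character indexed loop with two translation tables applied to three slices (idiomatic decomposition; same cost).

-- ===== PORT A =====
-- the dict literals (Char↔Char entries, each value a single character), insertion order
def pvNum2Alpha : PySem.Dict Char Char := PySem.Dict.ofList
  [('0','O'),('1','I'),('2','Z'),('3','E'),('4','A'),('5','S'),('6','G'),('7','T'),('8','B'),('9','P')]
def pvAlpha2Num : PySem.Dict Char Char := PySem.Dict.ofList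
  [('O','0'),('I','1'),('Z','2'),('E','3'),('A','4'),('S','5'),('G','6'),('T','7'),('B','8'),('P','9')]

def correct_plate_format (text : String) : String :=
  let t := PySem.Chars.replace (PySem.Chars.upper text.toList) [' '] []
  if t.length ≠ 7 then "" else
  let out := (PySem.List.enumerate t 0).foldl
    (fun (acc : List Char) (p : Int × Char) =>
      if p.1 < 2 ∨ 4 ≤ p.1 then acc ++ [pvNum2Alpha.getD p.2 p.2]
      else acc ++ [pvAlpha2Num.getD p.2 p.2]) []
  String.ofList out

-- ===== PORT B =====
-- translate table built from a dict: unmapped characters pass through (= str.translate)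
def pvTranslate (tbl : PySem.Dict Char Char) (c : Char) : Char := tbl.getD c c

def correct_plate_format_alt (text : String) : String :=
  let t := PySem.Chars.replace (PySem.Chars.upper text.toList) [' '] []
  if t.length ≠ 7 then "" else
  String.ofList ((PySem.List.slice t none (some 2)).map (pvTranslate pvNum2Alpha)
    ++ (PySem.List.slice t (some 2) (some 4)).map (pvTranslate pvAlpha2Num)
    ++ (PySem.List.slice t (some 4) none).map (pvTranslate pvNum2Alpha))

-- ===== PRECONDITION & SPEC =====
def Spec_correct_plate_format (text : String) (out : String) : Prop := out = correct_plate_format_alt text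
instance (text : String) (out : String) : Decidable (Spec_correct_plate_format text out) := by unfold Spec_correct_plate_format; infer_instance

-- ===== CLAIM (what is proved, stated in full; the proofs are below) =====
def Claim_equal_correct_plate_format : Prop := ∀ (text : String), Dom_correct_plate_format text → Spec_correct_plate_format text (correct_plate_format text)

-- ===== LEMMAS AND PROOFS =====
-- the two branch bodies agree once the list has exactly 7 characters
theorem pv_core (t : List Char) (ht : t.length = 7) :
    ((PySem.List.enumerate t 0).foldl
      (fun (acc : List Char) (p : Int × Char) =>
        if p.1 < 2 ∨ 4 ≤ p.1 then acc ++ [pvNum2Alpha.getD p.2 p.2]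
        else acc ++ [pvAlpha2Num.getD p.2 p.2]) [])
    = ((PySem.List.slice t none (some 2)).map (pvTranslate pvNum2Alpha)
      ++ (PySem.List.slice t (some 2) (some 4)).map (pvTranslate pvAlpha2Num)
      ++ (PySem.List.slice t (some 4) none).map (pvTranslate pvNum2Alpha)) := by
  match t, ht with
  | [a,b,c,d,e,f,g], _ =>
    simp [PySem.List.enumerate, PySem.List.slice, PySem.List.clampIdx, pvTranslate,
      List.foldl]

-- ===== VERDICT (by name: the statement is the Claim_ definition above) =====
theorem correct_plate_format_spec : Claim_equal_correct_plate_format := by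
  intro text _
  unfold Spec_correct_plate_format correct_plate_format correct_plate_format_alt
  set t := PySem.Chars.replace (PySem.Chars.upper text.toList) [' '] [] with ht
  by_cases h : t.length = 7
  · simp only [h, ne_eq, not_true_eq_false, if_false]
    exact congrArg String.ofList (pv_core t h)
  · simp [h]
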